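-- pv_equiv track=rewrite | github.com/patrick1238/Impro3000 | impro3000_1.1_beta/reader/parser_lib/batch_converter.py | identify_case
-- ===== SOURCE A (Python) =====
-- def identify_case(entry):
--     splitted = entry.split("_")
--     case = splitted[0]
--     if "-" not in case:
--         case = case + "-" + splitted[1]
--     counter = 0
--     for path_part in splitted:
--         if "ii" in path_part:
--             case = case + "_" + path_part.replace("[","")
--         if "Region" in path_part or "TileScan" in path_part:
--             if " " in path_part:
--                 case = case + "_" + path_part.replace(" ","-")
--             else:
--                 case = case + "_" + splitted[counter] + "-" + splitted[counter+1]
--             break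
--         counter = counter + 1
--     return case
-- ===== SOURCE B (Python) =====
-- def identify_case(entry):
--     splitted = entry.split("_")
--     # pass 1: locate the first part carrying a Region/TileScan marker
--     region_idx = None
--     for i, part in enumerate(splitted):
--         if "Region" in part or "TileScan" in part:
--             region_idx = i
--             break
--     case = splitted[0]
--     if "-" not in case:
--         case = case + "-" + splitted[1]
--     # pass 2: append the 'ii' parts up to (and including) the marker part
--     upto = len(splitted) if region_idx is None else region_idx + 1
--     for part in splitted[:upto]:
--         if "ii" in part:
--             case = case + "_" + part.replace("[", "")
--     # region formatting
--     if region_idx is not None: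
--         part = splitted[region_idx]
--         if " " in part:
--             case = case + "_" + part.replace(" ", "-")
--         else:
--             case = case + "_" + part + "-" + splitted[region_idx + 1]
--     return case
-- ===== Notes on version B (the rewrite author's own statement) =====
-- stated objective: alternative
-- what changed: A's single interleaved loop with a manual counter and break is replaced by a two-pass decomposition: first locate the index of the first Region/TileScan part, then fold the 'ii'-appends over the prefix up to it, then do the region formatting by index.
import Mathlib
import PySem

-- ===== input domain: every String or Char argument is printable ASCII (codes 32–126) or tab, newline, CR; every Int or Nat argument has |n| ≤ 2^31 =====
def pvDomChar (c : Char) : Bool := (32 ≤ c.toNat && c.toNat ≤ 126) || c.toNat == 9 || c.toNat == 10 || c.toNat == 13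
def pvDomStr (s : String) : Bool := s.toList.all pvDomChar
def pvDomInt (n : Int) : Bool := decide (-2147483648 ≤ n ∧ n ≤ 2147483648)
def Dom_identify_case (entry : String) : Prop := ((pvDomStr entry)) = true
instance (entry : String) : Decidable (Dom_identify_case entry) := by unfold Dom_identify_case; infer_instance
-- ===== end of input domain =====

-- B replaces A's single interleaved break-loop by a locate-then-process two-pass decomposition (objective: alternative, same cost).

-- ===== PORT A =====
-- A's for-loop with break and a manual counter, as structural recursion over the suffix.
def identifyLoopA (splitted : List String) : List String → String → Nat → String
  | [], case, _ => case
  | p :: rest, case, counter =>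
    let case := if PySem.Str.isIn "ii" p then case ++ "_" ++ PySem.Str.replace p "[" "" else case
    if PySem.Str.isIn "Region" p || PySem.Str.isIn "TileScan" p then
      if PySem.Str.isIn " " p then case ++ "_" ++ PySem.Str.replace p " " "-"
      else case ++ "_" ++ PySem.List.pyGetD splitted (counter : Int) "" ++ "-" ++
           PySem.List.pyGetD splitted ((counter : Int) + 1) ""
    else identifyLoopA splitted rest case (counter + 1)

def identify_case (entry : String) : String :=
  let splitted := (PySem.Str.split? entry "_").getD []
  let case := PySem.List.pyGetD splitted (0 : Int) ""
  let case := if PySem.Str.isIn "-" case then case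
              else case ++ "-" ++ PySem.List.pyGetD splitted (1 : Int) ""
  identifyLoopA splitted splitted case 0

-- ===== PORT B =====
-- B's pass 1: enumerate-scan for the first part carrying a Region/TileScan marker.
def findRegionIdx : List String → Nat → Option Nat
  | [], _ => none
  | p :: rest, i =>
    if PySem.Str.isIn "Region" p || PySem.Str.isIn "TileScan" p then some i
    else findRegionIdx rest (i + 1)

def identify_case_alt (entry : String) : String :=
  let splitted := (PySem.Str.split? entry "_").getD []
  let regionIdx? := findRegionIdx splitted 0
  let case := PySem.List.pyGetD splitted (0 : Int) ""
  let case := if PySem.Str.isIn "-" case then case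
              else case ++ "-" ++ PySem.List.pyGetD splitted (1 : Int) ""
  let upto := match regionIdx? with | none => splitted.length | some i => i + 1
  -- B's pass 2: fold over splitted[:upto] appending the 'ii' parts
  let case := (splitted.take upto).foldl
      (fun c p => if PySem.Str.isIn "ii" p then c ++ "_" ++ PySem.Str.replace p "[" "" else c) case
  match regionIdx? with
  | none => case
  | some i =>
      let p := PySem.List.pyGetD splitted (i : Int) ""
      if PySem.Str.isIn " " p then case ++ "_" ++ PySem.Str.replace p " " "-"
      else case ++ "_" ++ p ++ "-" ++ PySem.List.pyGetD splitted ((i : Int) + 1) ""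

-- ===== PRECONDITION & SPEC =====
-- Pre_ excludes exactly the inputs on which Python A raises IndexError: a single part without '-'
-- (splitted[1] missing), or a first space-free Region/TileScan part that is the last part
-- (splitted[counter+1] missing). B raises there too.
def Pre_identify_case (entry : String) : Prop :=
  let s := (PySem.Str.split? entry "_").getD []
  (PySem.Str.isIn "-" (s.getD 0 "") = true ∨ 2 ≤ s.length) ∧
  (∀ i, i < s.length →
    ((PySem.Str.isIn "Region" (s.getD i "") || PySem.Str.isIn "TileScan" (s.getD i "")) = true ∧
     ∀ j, j < i → (PySem.Str.isIn "Region" (s.getD j "") || PySem.Str.isIn "TileScan" (s.getD j "")) = false) →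
    (PySem.Str.isIn " " (s.getD i "") = true ∨ i + 1 < s.length))
instance (entry : String) : Decidable (Pre_identify_case entry) := by
  unfold Pre_identify_case; infer_instance
def pvWitness_identify_case : String := "a-b_ii1_Region 2"

def Spec_identify_case (entry : String) (out : String) : Prop := out = identify_case_alt entry
instance (entry : String) (out : String) : Decidable (Spec_identify_case entry out) := by unfold Spec_identify_case; infer_instance

-- ===== CLAIM (what is proved, stated in full; the proofs are below) =====
def Claim_equal_identify_case : Prop := ∀ (entry : String), Dom_identify_case entry → Pre_identify_case entry → Spec_identify_case entry (identify_case entry)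

-- ===== LEMMAS AND PROOFS =====

theorem findRegionIdx_ge (l : List String) (k i : Nat) (h : findRegionIdx l k = some i) : k ≤ i := by
  induction l generalizing k with
  | nil => simp [findRegionIdx] at h
  | cons p rest ih =>
    simp only [findRegionIdx] at h
    split at h
    · simp only [Option.some.injEq] at h; omega
    · exact Nat.le_of_succ_le (ih (k + 1) h)

theorem loopA_eq (splitted : List String) (rest : List String) (counter : Nat) (c : String)
    (h : splitted.drop counter = rest) :
    identifyLoopA splitted rest c counter =
      match findRegionIdx rest counter with
      | none => rest.foldl
          (fun c p => if PySem.Str.isIn "ii" p then c ++ "_" ++ PySem.Str.replace p "[" "" else c) c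
      | some i =>
          let c' := (rest.take (i + 1 - counter)).foldl
            (fun c p => if PySem.Str.isIn "ii" p then c ++ "_" ++ PySem.Str.replace p "[" "" else c) c
          let p := PySem.List.pyGetD splitted (i : Int) ""
          if PySem.Str.isIn " " p then c' ++ "_" ++ PySem.Str.replace p " " "-"
          else c' ++ "_" ++ p ++ "-" ++ PySem.List.pyGetD splitted ((i : Int) + 1) "" := by
  induction rest generalizing counter c with
  | nil => simp [identifyLoopA, findRegionIdx]
  | cons p rest ih =>
    have hget : PySem.List.pyGetD splitted (counter : Int) "" = p := by
      rw [PySem.List.pyGetD_natCast]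
      have h2 : splitted.getD counter "" = (splitted.drop counter).getD 0 "" := by
        by_cases hlt : counter < splitted.length
        · simp [List.getD, List.getElem?_drop]
        · rw [List.drop_eq_nil_of_le (by omega)]
          simp [List.getD, List.getElem?_eq_none (by omega : splitted.length ≤ counter)]
      rw [h2, h]; rfl
    simp only [identifyLoopA, findRegionIdx]
    cases hm : (PySem.Str.isIn "Region" p || PySem.Str.isIn "TileScan" p) with
    | true =>
      have h1 : counter + 1 - counter = 1 := by omega
      simp [hget, h1]
    | false =>
      have h' : splitted.drop (counter + 1) = rest := by
        rw [← List.tail_drop, h]; rfl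
      simp only [Bool.false_eq_true, if_false]
      rw [ih _ _ h']
      cases hf : findRegionIdx rest (counter + 1) with
      | none => simp
      | some i =>
        have hge := findRegionIdx_ge rest (counter + 1) i hf
        have htake : (p :: rest).take (i + 1 - counter) = p :: rest.take (i + 1 - (counter + 1)) := by
          rw [show i + 1 - counter = (i + 1 - (counter + 1)) + 1 from by omega, List.take_succ_cons]
        simp only [htake, List.foldl_cons]

-- ===== VERDICT (by name: the statement is the Claim_ definition above) =====
theorem identify_case_spec : Claim_equal_identify_case := by
  intro entry _ _
  unfold Spec_identify_case identify_case identify_case_alt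
  rw [loopA_eq _ _ 0 _ (by simp)]
  cases hf : findRegionIdx ((PySem.Str.split? entry "_").getD []) 0 with
  | none => simp [hf]
  | some i => simp [hf]
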